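-- pv_equiv track=rewrite | github.com/rohithsrinivasan/testmcu2 | Extraction/base_functions/multipage_pintable_extractor.py | compare_input_string_with_value_string
-- ===== SOURCE A (Python) =====
-- def compare_input_string_with_value_string(input_dict, input_string):
--     input_lines = set(input_string.splitlines())
--     result = {}
--
--     for key, value_string in input_dict.items():
--         value_lines = set(value_string.splitlines())
--         extra_lines = max(abs(len(value_lines - input_lines)), abs(len(input_lines - value_lines)))
--         result[key] = extra_lines
--
--     '''min_key = min(result, key=result.get)
--     return result, min_key'''
--
--     min_value = min(result.values())
--     min_keys = [key for key, value in result.items() if value == min_value]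
--
--     if len(min_keys) > 1:
--         # If multiple keys have the same minimum difference, choose the shortest key
--         min_key = min(min_keys, key=lambda k: len(str(k)))
--     else:
--         min_key = min_keys[0]
--
--     return result, min_key
-- ===== SOURCE B (Python) =====
-- def compare_input_string_with_value_string(input_dict, input_string):
--     input_lines = set(input_string.splitlines())
--     result = {}
--     best = None
--     for key, value_string in input_dict.items():
--         value_lines = set(value_string.splitlines())
--         score = max(len(value_lines), len(input_lines)) - len(input_lines & value_lines)
--         result[key] = score
--         cand = (score, len(key))
--         if best is None or cand < best[0]:
--             best = (cand, key)
--     return result, best[1]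
-- ===== Notes on version B (the rewrite author's own statement) =====
-- stated objective: simpler
-- what changed: B folds score computation and key selection into a single pass that keeps a running (score, key-length) lexicographic best, replacing A's three-pass min-value/tie-collect/shortest-key selection, and computes each score as max(|V|,|I|) - |V∩I| instead of maxing two directed set differences.
import Mathlib
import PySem

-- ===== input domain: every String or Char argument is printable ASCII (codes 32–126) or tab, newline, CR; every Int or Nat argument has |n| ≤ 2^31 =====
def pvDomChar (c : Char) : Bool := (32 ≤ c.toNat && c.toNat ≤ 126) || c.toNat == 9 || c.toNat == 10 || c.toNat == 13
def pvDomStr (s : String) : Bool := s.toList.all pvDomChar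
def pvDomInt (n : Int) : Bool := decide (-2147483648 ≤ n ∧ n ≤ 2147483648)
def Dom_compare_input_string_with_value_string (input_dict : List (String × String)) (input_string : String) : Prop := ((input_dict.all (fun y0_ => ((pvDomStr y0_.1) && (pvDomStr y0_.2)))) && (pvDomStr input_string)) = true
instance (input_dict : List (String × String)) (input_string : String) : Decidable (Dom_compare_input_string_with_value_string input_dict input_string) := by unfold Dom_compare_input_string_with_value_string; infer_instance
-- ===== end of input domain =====

-- ===== PORT A =====
-- B folds scoring and selection into one pass with a running lexicographic best; A's three-pass selection is shown to pick the same key.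
-- Pre_ excludes the empty dict, on which Python A raises ValueError (min of empty sequence) and B raises TypeError.
-- A-side helpers
def pvLinesSet (s : String) : PySem.Set String := PySem.Set.ofList (PySem.Str.splitlines s)

def pvStepA (input_lines : PySem.Set String) (r : PySem.Dict String Int) (kv : String × String) : PySem.Dict String Int :=
  let value_lines : PySem.Set String := pvLinesSet kv.2
  let extra_lines : Int :=
    max |PySem.Set.len (PySem.Set.diff value_lines input_lines)|
        |PySem.Set.len (PySem.Set.diff input_lines value_lines)|
  r.insert kv.1 extra_lines

def pvSelectA (result : PySem.Dict String Int) : String :=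
  match PySem.List.min? result.values (fun v => v) with
  | none => ""   -- unreachable under Pre_: min() of an empty sequence raises ValueError
  | some min_value =>
    let min_keys : List String := (result.items.filter (fun kv => kv.2 == min_value)).map (fun kv => kv.1)
    if 1 < min_keys.length then
      (PySem.List.min? min_keys (fun k => (PySem.Str.len k : Int))).getD ""   -- min(min_keys, key=len); nonempty under Pre_
    else
      min_keys.headD ""   -- min_keys[0]; nonempty under Pre_

def compare_input_string_with_value_string (input_dict : List (String × String)) (input_string : String) : (List (String × Int)) × String :=
  let input_lines := pvLinesSet input_string
  let result := (PySem.Dict.ofList input_dict).items.foldl (pvStepA input_lines) PySem.Dict.empty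
  (result.items, pvSelectA result)

-- ===== PORT B =====
-- B-side helper: one loop body that records the score and updates the running best
-- (Python tuple '<' on (score, len(key)) is ported as the explicit lexicographic test).
def pvStepB (input_lines : PySem.Set String)
    (st : PySem.Dict String Int × Option ((Int × Int) × String)) (kv : String × String) :
    PySem.Dict String Int × Option ((Int × Int) × String) :=
  let value_lines : PySem.Set String := pvLinesSet kv.2
  let score : Int :=
    max (PySem.Set.len value_lines) (PySem.Set.len input_lines)
      - PySem.Set.len (PySem.Set.inter input_lines value_lines)
  let cand : Int × Int := (score, (PySem.Str.len kv.1 : Int))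
  let best : Option ((Int × Int) × String) :=
    match st.2 with
    | none => some (cand, kv.1)
    | some b => if cand.1 < b.1.1 ∨ (cand.1 = b.1.1 ∧ cand.2 < b.1.2) then some (cand, kv.1) else some b
  (st.1.insert kv.1 score, best)

def compare_input_string_with_value_string_alt (input_dict : List (String × String)) (input_string : String) : (List (String × Int)) × String :=
  let input_lines := pvLinesSet input_string
  let st := (PySem.Dict.ofList input_dict).items.foldl (pvStepB input_lines) (PySem.Dict.empty, none)
  (st.1.items, (st.2.map (fun b => b.2)).getD "")   -- best[1]; best is not None under Pre_

-- ===== PRECONDITION & SPEC =====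
-- Pre_ excludes exactly the empty dict: there Python A raises ValueError (min() of an empty sequence).
def Pre_compare_input_string_with_value_string (input_dict : List (String × String)) (input_string : String) : Prop := input_dict ≠ []
instance (input_dict : List (String × String)) (input_string : String) : Decidable (Pre_compare_input_string_with_value_string input_dict input_string) := by unfold Pre_compare_input_string_with_value_string; infer_instance

def pvWitness_compare_input_string_with_value_string : (List (String × String)) × String := ([("a", "x")], "x")

def Spec_compare_input_string_with_value_string (input_dict : List (String × String)) (input_string : String) (out : (List (String × Int)) × String) : Prop := out = compare_input_string_with_value_string_alt input_dict input_string
instance (input_dict : List (String × String)) (input_string : String) (out : (List (String × Int)) × String) : Decidable (Spec_compare_input_string_with_value_string input_dict input_string out) := by unfold Spec_compare_input_string_with_value_string; infer_instance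

-- ===== CLAIM (what is proved, stated in full; the proofs are below) =====
def Claim_equal_compare_input_string_with_value_string : Prop := ∀ (input_dict : List (String × String)) (input_string : String), Dom_compare_input_string_with_value_string input_dict input_string → Pre_compare_input_string_with_value_string input_dict input_string → Spec_compare_input_string_with_value_string input_dict input_string (compare_input_string_with_value_string input_dict input_string)

-- ===== LEMMAS AND PROOFS =====

-- the two score formulas agree: max(|V-I|, |I-V|) = max(|V|, |I|) - |I∩V| on duplicate-free lists
theorem pv_cross (V I : List String) (hV : V.Nodup) (hI : I.Nodup) :
    (V.filter (fun x => PySem.Set.contains I x)).length = (I.filter (fun x => PySem.Set.contains V x)).length := by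
  rw [← List.toFinset_card_of_nodup (hV.filter _), ← List.toFinset_card_of_nodup (hI.filter _)]
  congr 1
  apply Finset.ext
  intro a
  simp [PySem.Set.contains]
  tauto

theorem pv_score_eq (V I : PySem.Set String) (hV : V.Nodup) (hI : I.Nodup) :
    max |PySem.Set.len (PySem.Set.diff V I)| |PySem.Set.len (PySem.Set.diff I V)|
      = max (PySem.Set.len V) (PySem.Set.len I) - PySem.Set.len (PySem.Set.inter I V) := by
  simp only [PySem.Set.len, PySem.Set.diff, PySem.Set.inter, Int.abs_natCast]
  have hV1 := List.length_eq_length_filter_add (fun x => PySem.Set.contains I x) (l := V)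
  have hI1 := List.length_eq_length_filter_add (fun x => PySem.Set.contains V x) (l := I)
  have hx := pv_cross V I hV hI
  have h1 : ((V.filter (fun x => !PySem.Set.contains I x)).length : Int)
      = (V.length : Int) - ((I.filter (fun x => PySem.Set.contains V x)).length : Int) := by omega
  have h2 : ((I.filter (fun x => !PySem.Set.contains V x)).length : Int)
      = (I.length : Int) - ((I.filter (fun x => PySem.Set.contains V x)).length : Int) := by omega
  rw [h1, h2, max_sub_sub_right]

-- per-item scores, named for the proofs
def pvScoreA (il : PySem.Set String) (kv : String × String) : Int :=
  max |PySem.Set.len (PySem.Set.diff (pvLinesSet kv.2) il)|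
      |PySem.Set.len (PySem.Set.diff il (pvLinesSet kv.2))|

def pvScoreB (il : PySem.Set String) (kv : String × String) : Int :=
  max (PySem.Set.len (pvLinesSet kv.2)) (PySem.Set.len il)
    - PySem.Set.len (PySem.Set.inter il (pvLinesSet kv.2))

-- B's running best, as a fold over (key, score) pairs
def pvF (p : String × Int) : Int × Int := (p.2, (PySem.Str.len p.1 : Int))

def pvSelAux (b : String × Int) (xs : List (String × Int)) : String × Int :=
  xs.foldl (fun b p => if (pvF p).1 < (pvF b).1 ∨ ((pvF p).1 = (pvF b).1 ∧ (pvF p).2 < (pvF b).2) then p else b) b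

def pvLStep (b : Option ((Int × Int) × String)) (p : String × Int) : Option ((Int × Int) × String) :=
  match b with
  | none => some (pvF p, p.1)
  | some bb => if (pvF p).1 < bb.1.1 ∨ ((pvF p).1 = bb.1.1 ∧ (pvF p).2 < bb.1.2) then some (pvF p, p.1) else some bb

-- A's selection, as a function of the (key, score) list and the minimal score
def pvASelect (L : List (String × Int)) (mv : Int) : String :=
  let mks := (L.filter (fun kv => kv.2 == mv)).map (fun kv => kv.1)
  if 1 < mks.length then (PySem.List.min? mks (fun k => (PySem.Str.len k : Int))).getD "" else mks.headD ""

theorem pv_min?_cons_cons (key : String → Int) (a b : String) (r : List String) :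
    PySem.List.min? (a :: b :: r) key
      = PySem.List.min? ((if key b < key a then b else a) :: r) key := by
  simp only [PySem.List.min?, List.foldl_cons]
  split_ifs <;> rfl

theorem pv_select_eq_minD (key : String → Int) (c : String) (R : List String) :
    (if 1 < (c :: R).length then (PySem.List.min? (c :: R) key).getD "" else (c :: R).headD "")
      = (PySem.List.min? (c :: R) key).getD "" := by
  cases R with
  | nil => simp [PySem.List.min?]
  | cons d t => simp

-- A's three-pass selection (min value, collect ties, shortest key) equals B's running lexicographic best
theorem pv_main (xs : List (String × Int)) : ∀ (x : String × Int),
    pvASelect (x :: xs) ((xs.map Prod.snd).foldl min x.2) = (pvSelAux x xs).1 := by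
  induction xs with
  | nil =>
    intro x
    simp [pvSelAux, pvASelect]
  | cons y t ih =>
    intro x
    have hsel : pvSelAux x (y :: t)
        = pvSelAux (if (pvF y).1 < (pvF x).1 ∨ ((pvF y).1 = (pvF x).1 ∧ (pvF y).2 < (pvF x).2) then y else x) t := rfl
    set x' := if (pvF y).1 < (pvF x).1 ∨ ((pvF y).1 = (pvF x).1 ∧ (pvF y).2 < (pvF x).2) then y else x with hx'
    have hx'2 : x'.2 = min x.2 y.2 := by
      rw [hx']; split_ifs with h <;> simp only [pvF] at h <;> omega
    rw [hsel, ← ih x']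
    simp only [List.map_cons, List.foldl_cons]
    rw [hx'2]
    set m := (t.map Prod.snd).foldl min (min x.2 y.2) with hm
    have hmle : m ≤ min x.2 y.2 := (PySem.List.foldl_min_le _ _).1
    by_cases hxy : x.2 = y.2
    · by_cases hxm : x.2 = m
      · -- tie case: both x and y carry the minimal value
        have hym : y.2 = m := by omega
        have hxt : (x.2 == m) = true := by simp [hxm]
        have hyt : (y.2 == m) = true := by simp [hym]
        have hx't : (x'.2 == m) = true := by simp; omega
        have hx'1 : x'.1 = if (PySem.Str.len y.1 : Int) < (PySem.Str.len x.1 : Int) then y.1 else x.1 := by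
          rw [hx']; simp only [pvF]; split_ifs with h1 h2 h2 <;> first | rfl | omega
        simp only [pvASelect, List.filter_cons, hxt, hyt, hx't, if_true, List.map_cons]
        set R := ((t.filter (fun kv => kv.2 == m)).map (fun kv => kv.1)) with hR
        rw [pv_select_eq_minD, pv_select_eq_minD, pv_min?_cons_cons, hx'1]
      · -- minimum comes from t only: x, y and x' are all filtered out
        have hym : ¬ (y.2 = m) := by omega
        have hxf : (x.2 == m) = false := by simp [hxm]
        have hyf : (y.2 == m) = false := by simp [hym]
        have hx'f : (x'.2 == m) = false := by simp; omega
        simp only [pvASelect, List.filter_cons, hxf, hyf, hx'f, if_false, Bool.false_eq_true]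
    · rcases lt_or_gt_of_ne (hxy) with hlt | hgt
      · -- x.2 < y.2 : x' = x and y is never minimal
        have hx'x : x' = x := by rw [hx']; rw [if_neg]; simp only [pvF]; omega
        have hyf : (y.2 == m) = false := by simp; omega
        simp only [pvASelect, List.filter_cons, hyf, Bool.false_eq_true, if_false, hx'x]
      · -- y.2 < x.2 : x' = y and x is never minimal
        have hx'y : x' = y := by rw [hx']; rw [if_pos]; simp only [pvF]; omega
        have hxf : (x.2 == m) = false := by simp; omega
        simp only [pvASelect, List.filter_cons, hxf, Bool.false_eq_true, if_false, hx'y]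

-- the option-valued fold of B carries exactly (pvF best, best key)
theorem pv_fold_some (xs : List (String × Int)) : ∀ (b : String × Int),
    xs.foldl pvLStep (some (pvF b, b.1)) = some (pvF (pvSelAux b xs), (pvSelAux b xs).1) := by
  induction xs with
  | nil => intro b; simp [pvSelAux]
  | cons p t ih =>
    intro b
    have h1 : pvLStep (some (pvF b, b.1)) p
        = some (pvF (if (pvF p).1 < (pvF b).1 ∨ ((pvF p).1 = (pvF b).1 ∧ (pvF p).2 < (pvF b).2) then p else b),
                (if (pvF p).1 < (pvF b).1 ∨ ((pvF p).1 = (pvF b).1 ∧ (pvF p).2 < (pvF b).2) then p else b).1) := by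
      simp only [pvLStep]
      split_ifs <;> rfl
    have h2 : pvSelAux b (p :: t)
        = pvSelAux (if (pvF p).1 < (pvF b).1 ∨ ((pvF p).1 = (pvF b).1 ∧ (pvF p).2 < (pvF b).2) then p else b) t := rfl
    rw [List.foldl_cons, h1, h2, ih]

-- a dict built from a nonempty association list has nonempty items
theorem pv_items_ofList_ne_nil (a : String × String) (l : List (String × String)) :
    (PySem.Dict.ofList (a :: l)).items ≠ [] := by
  intro h
  have hk : (PySem.Dict.ofList (a :: l)).keys = PySem.Set.ofList ((a :: l).map Prod.fst) := by
    show (PySem.Dict.empty.update (a :: l)).keys = _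
    rw [PySem.Dict.update]
    rw [show (fun (acc : PySem.Dict String String) (p : String × String) => acc.insert p.1 p.2)
        = (fun acc p => acc.insert (Prod.fst p) ((fun (_ : PySem.Dict String String) (q : String × String) => q.2) acc p)) from rfl]
    rw [PySem.Dict.keys_foldl_insert_key]
    rw [PySem.Dict.keys_empty, PySem.Set.update_nil_left]
  have hmem : a.1 ∈ (PySem.Dict.ofList (a :: l)).keys := by
    rw [hk, PySem.Set.mem_ofList]
    exact List.mem_map_of_mem (List.mem_cons_self ..)
  rw [PySem.Dict.keys, h] at hmem
  simp at hmem

-- ===== VERDICT (by name: the statement is the Claim_ definition above) =====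
theorem compare_input_string_with_value_string_spec : Claim_equal_compare_input_string_with_value_string := by
  intro l s _hdom hpre
  unfold Spec_compare_input_string_with_value_string
  unfold compare_input_string_with_value_string compare_input_string_with_value_string_alt
  set il := pvLinesSet s with hil
  set items := (PySem.Dict.ofList l).items with hitems
  -- the items list is nonempty
  have hne : items ≠ [] := by
    cases l with
    | nil => exact absurd rfl hpre
    | cons a l' => exact pv_items_ofList_ne_nil a l'
  have hnodup : (items.map Prod.fst).Nodup := by
    have := PySem.Dict.nodup_keys_ofList l
    rwa [PySem.Dict.keys] at this
  -- A's result dict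
  have hA : (items.foldl (pvStepA il) PySem.Dict.empty).items
      = items.map (fun kv => (kv.1, pvScoreA il kv)) := by
    have := PySem.Dict.items_foldl_insert_fresh items Prod.fst (pvScoreA il) PySem.Dict.empty
      (fun a _ => PySem.Dict.contains_empty a.1) hnodup
    simpa using this
  -- B's paired fold splits into the result dict and the running best
  have hstep : pvStepB il = (fun (st : PySem.Dict String Int × Option ((Int × Int) × String)) (kv : String × String) =>
      (st.1.insert kv.1 (pvScoreB il kv), pvLStep st.2 (kv.1, pvScoreB il kv))) := by
    funext st kv
    cases h : st.2 <;> simp only [pvStepB, pvLStep, h, pvScoreB, pvF]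
  have hB : items.foldl (pvStepB il) (PySem.Dict.empty, none)
      = (items.foldl (fun d (kv : String × String) => d.insert kv.1 (pvScoreB il kv)) PySem.Dict.empty,
         items.foldl (fun b kv => pvLStep b (kv.1, pvScoreB il kv)) none) := by
    rw [hstep]
    exact PySem.List.foldl_prod_mk (fun (d : PySem.Dict String Int) (kv : String × String) => d.insert kv.1 (pvScoreB il kv))
      (fun b kv => pvLStep b (kv.1, pvScoreB il kv)) items _ _
  have hBitems : (items.foldl (fun d (kv : String × String) => d.insert kv.1 (pvScoreB il kv)) PySem.Dict.empty).items
      = items.map (fun kv => (kv.1, pvScoreB il kv)) := by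
    have := PySem.Dict.items_foldl_insert_fresh items Prod.fst (pvScoreB il) PySem.Dict.empty
      (fun a _ => PySem.Dict.contains_empty a.1) hnodup
    simpa using this
  -- the two score formulas coincide
  have hscore : ∀ kv : String × String, pvScoreA il kv = pvScoreB il kv := by
    intro kv
    exact pv_score_eq (pvLinesSet kv.2) il (PySem.Set.nodup_ofList _) (PySem.Set.nodup_ofList _)
  have hmap : items.map (fun kv => (kv.1, pvScoreA il kv)) = items.map (fun kv => (kv.1, pvScoreB il kv)) := by
    apply List.map_congr_left
    intro kv _
    rw [hscore]
  -- name the common (key, score) list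
  obtain ⟨kv0, rest, hit⟩ := List.exists_cons_of_ne_nil hne
  have hselB : items.foldl (fun b kv => pvLStep b (kv.1, pvScoreB il kv)) none
      = some (pvF (pvSelAux (kv0.1, pvScoreB il kv0) (rest.map (fun kv => (kv.1, pvScoreB il kv)))),
              (pvSelAux (kv0.1, pvScoreB il kv0) (rest.map (fun kv => (kv.1, pvScoreB il kv)))).1) := by
    rw [hit, List.foldl_cons]
    have h0 : pvLStep none (kv0.1, pvScoreB il kv0)
        = some (pvF (kv0.1, pvScoreB il kv0), (kv0.1, pvScoreB il kv0).1) := rfl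
    rw [h0, show (fun (b : Option ((Int × Int) × String)) (kv : String × String) => pvLStep b (kv.1, pvScoreB il kv))
        = (fun b kv => pvLStep b ((fun kv : String × String => (kv.1, pvScoreB il kv)) kv)) from rfl,
      ← List.foldl_map (f := fun kv : String × String => (kv.1, pvScoreB il kv)) (g := pvLStep)]
    exact pv_fold_some _ _
  have hitem2 : (items.foldl (pvStepA il) PySem.Dict.empty).items
      = (kv0.1, pvScoreB il kv0) :: rest.map (fun kv => (kv.1, pvScoreB il kv)) := by
    rw [hA, hmap, hit, List.map_cons]
  dsimp only
  rw [hB]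
  dsimp only
  rw [hselB]
  simp only [Option.map_some, Option.getD_some, Prod.mk.injEq]
  constructor
  · rw [hitem2, hBitems, hit, List.map_cons]
  · simp only [pvSelectA, PySem.Dict.values, hitem2, List.map_cons]
    rw [PySem.List.min?_id_cons]
    dsimp only
    exact pv_main (rest.map (fun kv => (kv.1, pvScoreB il kv))) ((kv0.1, pvScoreB il kv0))
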